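-- pv_equiv track=rewrite | github.com/spencerhcindia/code-with-friends | 2024-06-26/built-ins.py | number_sort
-- ===== SOURCE A (Python) =====
-- from collections import defaultdict, Counter, deque
--
-- def number_sort(k: int) -> dict:
--     shape = defaultdict(list)
--     for i in range(k+1):
--         if i % 2 == 0:
--             shape["even"].append(i)
--         if i % 2 != 0:
--             shape["odd"].append(i)
--         if i % 3 == 0:
--             shape["divisible_3"].append(i)
--         if i % 5 == 0:
--             shape["divisible_5"].append(i)
--     return dict(shape)
-- ===== SOURCE B (Python) =====
-- def number_sort(k: int) -> dict:
--     shape = {}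
--     for name, start, step in (("even", 0, 2), ("divisible_3", 0, 3),
--                               ("divisible_5", 0, 5), ("odd", 1, 2)):
--         vals = list(range(start, k + 1, step))
--         if vals:
--             shape[name] = vals
--     return shape
-- ===== Notes on version B (the rewrite author's own statement) =====
-- stated objective: faster
-- what changed: Replaces A's single per-element loop with four modulo tests and defaultdict appends by computing each category directly as a stepped range, inserting a key only when its list is nonempty, which reproduces defaultdict's create-on-first-append key order.
import Mathlib
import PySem

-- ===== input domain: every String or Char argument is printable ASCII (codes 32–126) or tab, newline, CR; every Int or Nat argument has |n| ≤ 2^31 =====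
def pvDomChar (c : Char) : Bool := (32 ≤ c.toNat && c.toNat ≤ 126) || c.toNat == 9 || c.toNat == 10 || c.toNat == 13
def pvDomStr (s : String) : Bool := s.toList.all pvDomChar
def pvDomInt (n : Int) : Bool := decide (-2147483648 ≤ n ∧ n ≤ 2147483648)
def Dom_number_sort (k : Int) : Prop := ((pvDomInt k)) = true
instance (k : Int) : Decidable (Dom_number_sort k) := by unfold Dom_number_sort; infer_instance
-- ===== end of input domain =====

-- B replaces A's single loop with per-element modulo tests by four directly computed
-- stepped ranges, inserting each key only when its list is nonempty (objective: faster — C-level range construction instead of a per-element Python loop).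

-- ===== PORT A =====
-- the body of A's for-loop: defaultdict(list), so shape[key].append(i) creates the key on first touch
def pvStepA (d : PySem.Dict String (List Int)) (i : Int) : PySem.Dict String (List Int) :=
  let d := if PySem.Int.mod i 2 == 0 then d.modify "even" [] (· ++ [i]) else d
  let d := if PySem.Int.mod i 2 != 0 then d.modify "odd" [] (· ++ [i]) else d
  let d := if PySem.Int.mod i 3 == 0 then d.modify "divisible_3" [] (· ++ [i]) else d
  if PySem.Int.mod i 5 == 0 then d.modify "divisible_5" [] (· ++ [i]) else d

def number_sort (k : Int) : List (String × List Int) :=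
  ((PySem.List.pyRange 0 (k+1) 1).foldl pvStepA PySem.Dict.empty).items

-- ===== PORT B =====
def number_sort_alt (k : Int) : List (String × List Int) :=
  [("even", (0:Int), (2:Int)), ("divisible_3", 0, 3), ("divisible_5", 0, 5), ("odd", 1, 2)].foldl
    (fun shape c =>
      let vals := PySem.List.pyRange c.2.1 (k+1) c.2.2
      if vals.isEmpty then shape else shape ++ [(c.1, vals)])
    []

-- ===== PRECONDITION & SPEC =====
def Spec_number_sort (k : Int) (out : List (String × List Int)) : Prop := out = number_sort_alt k
instance (k : Int) (out : List (String × List Int)) : Decidable (Spec_number_sort k out) := by unfold Spec_number_sort; infer_instance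

-- ===== CLAIM (what is proved, stated in full; the proofs are below) =====
def Claim_equal_number_sort : Prop := ∀ (k : Int), Dom_number_sort k → Spec_number_sort k (number_sort k)

-- ===== LEMMAS AND PROOFS =====

-- the items of A's dict after processing 0..b-1 (b ≥ 1): the "odd" key appears only once 1 was processed
def pvShape (b : Int) : List (String × List Int) :=
  [("even", PySem.List.pyRange 0 b 2), ("divisible_3", PySem.List.pyRange 0 b 3),
   ("divisible_5", PySem.List.pyRange 0 b 5)] ++
  (if 2 ≤ b then [("odd", PySem.List.pyRange 1 b 2)] else [])

theorem pyRange_pos_eq_nil (a b s : Int) (h0 : 0 < s) (hba : b ≤ a) :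
    PySem.List.pyRange a b s = [] := by
  rw [PySem.List.pyRange_of_pos _ _ h0]
  simp [show ¬ a < b by omega]

theorem pyRange_pos_ne_nil (a b s : Int) (h0 : 0 < s) (hab : a < b) :
    PySem.List.pyRange a b s ≠ [] :=
  List.ne_nil_of_mem ((PySem.List.mem_pyRange_iff_of_pos h0 a).mpr ⟨le_refl a, hab, ⟨0, by ring⟩⟩)

theorem pyRange_succ_right_dvd (a b s : Int) (h0 : 0 < s) (hab : a ≤ b)
    (hd : s ∣ b - a) : PySem.List.pyRange a (b+1) s = PySem.List.pyRange a b s ++ [b] := by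
  obtain ⟨q, hq⟩ := hd
  have hq0 : 0 ≤ q := by nlinarith
  rw [PySem.List.pyRange_of_pos _ _ h0, PySem.List.pyRange_of_pos _ _ h0]
  have h1 : (b + 1 - a + s - 1) / s = q + 1 := by
    have : b + 1 - a + s - 1 = s * (q + 1) := by linarith
    rw [this, Int.mul_ediv_cancel_left _ (by omega)]
  by_cases hc : a < b
  · have h2 : (b - a + s - 1) / s = q := by
      have : b - a + s - 1 = (s - 1) + s * q := by linarith
      rw [this, Int.add_mul_ediv_left _ _ (by omega), Int.ediv_eq_zero_of_lt (by omega) (by omega)]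
      ring
    rw [if_pos (show a < b + 1 by omega), if_pos hc, h1, h2,
        show (q+1).toNat = q.toNat + 1 by omega, List.range_succ, List.map_append]
    simp only [List.map_cons, List.map_nil]
    congr 2
    rw [Int.toNat_of_nonneg hq0]; linarith
  · have hb : b = a := by omega
    subst hb
    rw [if_pos (show b < b + 1 by omega), if_neg hc,
        show b + 1 - b + s - 1 = s by ring, Int.ediv_self (by omega)]
    simp

theorem pyRange_succ_right_ndvd (a b s : Int) (h0 : 0 < s) (hab : a ≤ b)
    (hd : ¬ s ∣ b - a) : PySem.List.pyRange a (b+1) s = PySem.List.pyRange a b s := by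
  have hc : a < b := by
    rcases lt_or_eq_of_le hab with h | h
    · exact h
    · exact absurd (h ▸ ⟨0, by ring⟩) hd
  have hq := Int.mul_ediv_add_emod (b - a) s
  set q := (b - a) / s with hqdef
  set r := (b - a) % s with hrdef
  have hr0 : 0 < r := by
    rcases (Int.emod_nonneg (b - a) (by omega : s ≠ 0)).lt_or_eq with h | h
    · exact h
    · exact absurd (Int.dvd_of_emod_eq_zero h.symm) hd
  have hrs : r < s := Int.emod_lt_of_pos _ h0
  rw [PySem.List.pyRange_of_pos _ _ h0, PySem.List.pyRange_of_pos _ _ h0]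
  have h1 : (b + 1 - a + s - 1) / s = q + 1 := by
    have : b + 1 - a + s - 1 = r + s * (q + 1) := by linarith
    rw [this, Int.add_mul_ediv_left _ _ (by omega), Int.ediv_eq_zero_of_lt (by omega) (by omega)]
    ring
  have h2 : (b - a + s - 1) / s = q + 1 := by
    have : b - a + s - 1 = (r - 1) + s * (q + 1) := by linarith
    rw [this, Int.add_mul_ediv_left _ _ (by omega), Int.ediv_eq_zero_of_lt (by omega) (by omega)]
    ring
  rw [if_pos (show a < b + 1 by omega), if_pos hc, h1, h2]

theorem step_shape (b : Int) (hb : 1 ≤ b) :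
    pvStepA (PySem.Dict.mk (pvShape b)) b = PySem.Dict.mk (pvShape (b+1)) := by
  by_cases hb2 : 2 ≤ b
  · unfold pvShape
    rw [if_pos hb2, if_pos (show 2 ≤ b + 1 by omega)]
    rw [show PySem.List.pyRange 0 (b+1) 2 =
          PySem.List.pyRange 0 b 2 ++ (if (2:Int) ∣ b then [b] else []) by
        split_ifs with h
        · exact pyRange_succ_right_dvd 0 b 2 (by norm_num) (by omega) (by simpa using h)
        · simpa using pyRange_succ_right_ndvd 0 b 2 (by norm_num) (by omega) (by simpa using h),
        show PySem.List.pyRange 0 (b+1) 3 =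
          PySem.List.pyRange 0 b 3 ++ (if (3:Int) ∣ b then [b] else []) by
        split_ifs with h
        · exact pyRange_succ_right_dvd 0 b 3 (by norm_num) (by omega) (by simpa using h)
        · simpa using pyRange_succ_right_ndvd 0 b 3 (by norm_num) (by omega) (by simpa using h),
        show PySem.List.pyRange 0 (b+1) 5 =
          PySem.List.pyRange 0 b 5 ++ (if (5:Int) ∣ b then [b] else []) by
        split_ifs with h
        · exact pyRange_succ_right_dvd 0 b 5 (by norm_num) (by omega) (by simpa using h)
        · simpa using pyRange_succ_right_ndvd 0 b 5 (by norm_num) (by omega) (by simpa using h),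
        show PySem.List.pyRange 1 (b+1) 2 =
          PySem.List.pyRange 1 b 2 ++ (if (2:Int) ∣ b then [] else [b]) by
        split_ifs with h
        · simpa using pyRange_succ_right_ndvd 1 b 2 (by norm_num) (by omega) (by omega)
        · exact pyRange_succ_right_dvd 1 b 2 (by norm_num) (by omega) (by omega)]
    by_cases h2 : (2:Int) ∣ b <;> by_cases h3 : (3:Int) ∣ b <;> by_cases h5 : (5:Int) ∣ b <;>
      simp [pvStepA, h2, h3, h5,
        PySem.Dict.modify, PySem.Dict.insert, PySem.Dict.getD_eq_get?_getD,
        PySem.Dict.get?_mk_cons]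
  · have : b = 1 := by omega
    subst this
    decide

theorem loop_items (n : Nat) :
    ((PySem.List.pyRange 0 ((n:Int)+1) 1).foldl pvStepA PySem.Dict.empty) =
      PySem.Dict.mk (pvShape ((n:Int)+1)) := by
  induction n with
  | zero => decide
  | succ n ih =>
    rw [show ((n+1:Nat):Int) + 1 = ((n:Int)+1) + 1 by push_cast; ring,
        PySem.List.pyRange_one_succ_right (by omega), List.foldl_append, ih]
    simpa using step_shape ((n:Int)+1) (by omega)

theorem alt_eq_shape (k : Int) (hk : 0 ≤ k) : number_sort_alt k = pvShape (k+1) := by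
  unfold number_sort_alt pvShape
  simp only [List.foldl]
  rw [List.isEmpty_eq_false_iff.mpr (pyRange_pos_ne_nil 0 (k+1) 2 (by norm_num) (by omega)),
      List.isEmpty_eq_false_iff.mpr (pyRange_pos_ne_nil 0 (k+1) 3 (by norm_num) (by omega)),
      List.isEmpty_eq_false_iff.mpr (pyRange_pos_ne_nil 0 (k+1) 5 (by norm_num) (by omega))]
  by_cases h1 : 1 ≤ k
  · rw [List.isEmpty_eq_false_iff.mpr (pyRange_pos_ne_nil 1 (k+1) 2 (by norm_num) (by omega)),
        if_pos (show 2 ≤ k + 1 by omega)]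
    simp
  · have hk0 : k = 0 := by omega
    subst hk0
    decide

-- ===== VERDICT (by name: the statement is the Claim_ definition above) =====
theorem number_sort_spec : Claim_equal_number_sort := by
  intro k _
  unfold Spec_number_sort
  by_cases hk : 0 ≤ k
  · obtain ⟨n, rfl⟩ := Int.eq_ofNat_of_zero_le hk
    rw [number_sort, loop_items n, alt_eq_shape _ hk]
  · rw [number_sort, PySem.List.pyRange_one_eq_nil (by omega)]
    unfold number_sort_alt
    simp only [List.foldl]
    rw [pyRange_pos_eq_nil 0 (k+1) 2 (by norm_num) (by omega),
        pyRange_pos_eq_nil 0 (k+1) 3 (by norm_num) (by omega),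
        pyRange_pos_eq_nil 0 (k+1) 5 (by norm_num) (by omega),
        pyRange_pos_eq_nil 1 (k+1) 2 (by norm_num) (by omega)]
    simp [PySem.Dict.empty]
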